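-- pv_equiv track=rewrite | github.com/qebrahim/CISC327-Web-App | A6 (2)/validate.py | validate_account_username
-- ===== SOURCE A (Python) =====
-- def validate_account_username(username: str) -> str:
--     """
--     Validates and normalizes a username.
--     """
--     username = username.strip()
--     if username == "":
--         raise ValueError("username must not be empty")
--     if len(username) > 24:
--         raise ValueError("username too long")
--     for char in username:
--         if not (char.isalnum() and char.isascii() and char.islower()):
--             if char not in [".", "_"]:
--                 raise ValueError("username must only contain lowercase letters, numbers, dots, and underscores")
--     return username
-- ===== SOURCE B (Python) =====
-- def validate_account_username(username: str) -> str: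
--     """
--     Validates and normalizes a username.
--     """
--     username = username.strip()
--     if username == "":
--         raise ValueError("username must not be empty")
--     if len(username) > 24:
--         raise ValueError("username too long")
--     if set(username) - set("abcdefghijklmnopqrstuvwxyz._"):
--         raise ValueError("username must only contain lowercase letters, numbers, dots, and underscores")
--     return username
-- ===== Notes on version B (the rewrite author's own statement) =====
-- stated objective: idiomatic
-- what changed: The per-character loop with its nested isalnum/isascii/islower tests is replaced by one whole-string set-difference test against the literal allowed alphabet of lowercase letters, dot and underscore (digits are correctly absent, since A's islower() test rejects them).
import Mathlib
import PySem

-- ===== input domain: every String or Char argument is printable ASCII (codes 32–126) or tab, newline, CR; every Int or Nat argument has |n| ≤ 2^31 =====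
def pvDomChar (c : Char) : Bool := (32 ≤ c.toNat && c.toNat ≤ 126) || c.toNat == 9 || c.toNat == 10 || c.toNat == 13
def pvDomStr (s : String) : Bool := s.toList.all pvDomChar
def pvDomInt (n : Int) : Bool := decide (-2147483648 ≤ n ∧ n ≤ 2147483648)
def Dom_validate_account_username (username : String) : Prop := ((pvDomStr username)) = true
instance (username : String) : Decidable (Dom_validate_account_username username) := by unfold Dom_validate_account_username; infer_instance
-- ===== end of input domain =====

-- B replaces A's per-character isalnum/isascii/islower loop by one set-difference test
-- against the allowed alphabet of lowercase letters, dot and underscore (idiomatic; same cost).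

-- ===== PORT A =====
-- char.isascii() has no PySem primitive; ported by hand as c.toNat ≤ 127 (exact: Python's
-- isascii is code point ≤ 0x7F).  The loop raises on the first offending char and otherwise
-- falls through: all raise-paths collapse to the sentinel "" (excluded by Pre_).
def validate_account_username (username : String) : String :=
  let u := PySem.Str.strip username
  if u = "" then ""                                   -- raise ValueError("username must not be empty")
  else if 24 < PySem.Str.len u then ""                -- raise ValueError("username too long")
  else if u.toList.all (fun c =>
      (PySem.Chars.isalnum c && decide (c.toNat ≤ 127) && PySem.Chars.islower c)
      || (c == '.' || c == '_')) then u
  else ""                                             -- raise ValueError("username must only contain …")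

-- ===== PORT B =====
def pvAllowed : List Char := ['a','b','c','d','e','f','g','h','i','j','k','l','m','n','o','p','q','r','s','t','u','v','w','x','y','z','.','_']

-- set(username) - set("abcdefghijklmnopqrstuvwxyz._") ported as the Set of u's distinct
-- characters filtered to those not in the allowed alphabet (exact set-difference semantics).
def validate_account_username_alt (username : String) : String :=
  let u := PySem.Str.strip username
  if u = "" then ""                                   -- raise ValueError("username must not be empty")
  else if 24 < PySem.Str.len u then ""                -- raise ValueError("username too long")
  else if ((PySem.Set.ofList u.toList).filter (fun c => !(pvAllowed.contains c))) ≠ [] then ""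
                                                      -- raise ValueError("username must only contain …")
  else u

-- ===== PRECONDITION & SPEC =====
-- Pre_: exactly the inputs on which the Python A returns (no ValueError): the stripped
-- string is nonempty, at most 24 chars, and made only of lowercase ASCII letters, dots and underscores.
def Pre_validate_account_username (username : String) : Prop :=
  PySem.Str.strip username ≠ "" ∧
  PySem.Str.len (PySem.Str.strip username) ≤ 24 ∧
  (PySem.Str.strip username).toList.all (fun c => pvAllowed.contains c) = true
instance (username : String) : Decidable (Pre_validate_account_username username) := by
  unfold Pre_validate_account_username; infer_instance

def pvWitness_validate_account_username : String := " bob_e. "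

def Spec_validate_account_username (username : String) (out : String) : Prop := out = validate_account_username_alt username
instance (username : String) (out : String) : Decidable (Spec_validate_account_username username out) := by unfold Spec_validate_account_username; infer_instance

-- ===== CLAIM (what is proved, stated in full; the proofs are below) =====
def Claim_equal_validate_account_username : Prop := ∀ (username : String), Dom_validate_account_username username → Pre_validate_account_username username → Spec_validate_account_username username (validate_account_username username)

-- ===== LEMMAS AND PROOFS =====

-- every allowed char passes A's per-character test
lemma allowed_passes_A (c : Char) (h : c ∈ pvAllowed) :
    ((PySem.Chars.isalnum c && decide (c.toNat ≤ 127) && PySem.Chars.islower c)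
      || (c == '.' || c == '_')) = true := by
  fin_cases h <;> decide

-- ===== VERDICT (by name: the statement is the Claim_ definition above) =====
theorem validate_account_username_spec : Claim_equal_validate_account_username := by
  intro username _ hpre
  obtain ⟨h1, h2, h3'⟩ := hpre
  rw [List.all_eq_true] at h3'
  have h3 : ∀ c ∈ (PySem.Str.strip username).toList, c ∈ pvAllowed := by
    intro c hc
    simpa [List.contains_eq_mem] using h3' c hc
  unfold Spec_validate_account_username validate_account_username validate_account_username_alt
  simp only [if_neg h1, if_neg (by omega : ¬ 24 < PySem.Str.len (PySem.Str.strip username))]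
  rw [if_pos, if_neg]
  · simp only [ne_eq, not_not, List.filter_eq_nil_iff]
    intro c hc
    have : c ∈ (PySem.Str.strip username).toList := (PySem.Set.mem_ofList _ _).mp hc
    simp [List.contains_eq_mem, h3 c this]
  · rw [List.all_eq_true]
    intro c hc
    exact allowed_passes_A c (h3 c hc)
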